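-- pv_equiv track=rewrite | github.com/yclin0214/tradebot_v0 | src/trade/BidAskManager.py | dedupe_sorted_ask_candidates
-- ===== SOURCE A (Python) =====
-- def dedupe_sorted_ask_candidates(input_list, floor):
--     deduped_list = []
--     for i in range(0, len(input_list)):
--         if input_list[i] < floor:
--             break
--         if i > 0 and input_list[i] == input_list[i - 1]:
--             continue
--         deduped_list.append(input_list[i])
--     return deduped_list
-- ===== SOURCE B (Python) =====
-- def dedupe_sorted_ask_candidates(input_list, floor):
--     # Stage 1: locate the cut point (first element below floor) by index search.
--     cut = next((i for i, x in enumerate(input_list) if x < floor), len(input_list))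
--     # Stage 2: build the answer BACK-TO-FRONT: walk the kept prefix in reverse,
--     # emitting an element only when it differs from the last one emitted,
--     # then reverse once at the end.
--     result = []
--     for x in reversed(input_list[:cut]):
--         if not result or result[-1] != x:
--             result.append(x)
--     result.reverse()
--     return result
-- ===== Notes on version B (the rewrite author's own statement) =====
-- stated objective: alternative
-- what changed: the forward index loop with break/continue is replaced by first locating the cut index of the first element below floor, then building the result back-to-front over the reversed prefix, emitting an element only when it differs from the last one emitted, and reversing once at the end
import Mathlib
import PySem

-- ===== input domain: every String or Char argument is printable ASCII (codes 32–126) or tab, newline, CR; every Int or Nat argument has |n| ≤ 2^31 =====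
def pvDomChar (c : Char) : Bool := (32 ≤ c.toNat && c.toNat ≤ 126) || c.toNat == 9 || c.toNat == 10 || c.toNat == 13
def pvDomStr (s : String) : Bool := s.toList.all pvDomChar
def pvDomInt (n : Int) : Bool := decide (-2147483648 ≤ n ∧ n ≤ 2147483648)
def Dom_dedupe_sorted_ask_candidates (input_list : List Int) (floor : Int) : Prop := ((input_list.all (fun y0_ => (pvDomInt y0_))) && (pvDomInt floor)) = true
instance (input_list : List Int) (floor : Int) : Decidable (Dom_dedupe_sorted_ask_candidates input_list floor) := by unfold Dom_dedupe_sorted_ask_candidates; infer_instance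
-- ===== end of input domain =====

-- B replaces A's forward index loop with break/continue by a cut-index search followed
-- by a back-to-front build over the reversed prefix; same asymptotic cost.

-- ===== PORT A =====
-- A's for-loop over indices, with `break` and `continue`, transcribed as a recursion
-- over the list carrying the previous element (input_list[i-1]) as an Option.
def dsacLoop (floor : Int) : List Int → Option Int → List Int
  | [], _ => []
  | x :: xs, prev =>
    if x < floor then []                                  -- break
    else if prev = some x then dsacLoop floor xs (some x) -- continue (skip duplicate)
    else x :: dsacLoop floor xs (some x)                  -- append

def dedupe_sorted_ask_candidates (input_list : List Int) (floor : Int) : List Int :=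
  dsacLoop floor input_list none

-- ===== PORT B =====
-- stage 1: next((i for i, x in enumerate(input_list) if x < floor), len(input_list))
def dsacFindCut (floor : Int) : List Int → Nat
  | [] => 0
  | x :: xs => if x < floor then 0 else dsacFindCut floor xs + 1

-- loop body: `if not result or result[-1] != x: result.append(x)`
def dsacStep (acc : List Int) (x : Int) : List Int :=
  if acc.getLast? ≠ some x then acc ++ [x] else acc

-- stage 2: fold the loop body over reversed(input_list[:cut]), then reverse once.
def dedupe_sorted_ask_candidates_alt (input_list : List Int) (floor : Int) : List Int :=
  (((input_list.take (dsacFindCut floor input_list)).reverse).foldl dsacStep []).reverse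

-- ===== PRECONDITION & SPEC =====
def Spec_dedupe_sorted_ask_candidates (input_list : List Int) (floor : Int) (out : List Int) : Prop := out = dedupe_sorted_ask_candidates_alt input_list floor
instance (input_list : List Int) (floor : Int) (out : List Int) : Decidable (Spec_dedupe_sorted_ask_candidates input_list floor out) := by unfold Spec_dedupe_sorted_ask_candidates; infer_instance

-- ===== CLAIM =====
def Claim_equal_dedupe_sorted_ask_candidates : Prop := ∀ (input_list : List Int) (floor : Int), Dom_dedupe_sorted_ask_candidates input_list floor → Spec_dedupe_sorted_ask_candidates input_list floor (dedupe_sorted_ask_candidates input_list floor)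

-- ===== LEMMAS AND PROOFS =====
-- proof-only helper: collapse consecutive duplicates (reference form both ports reach)
def dedupConsec : List Int → List Int
  | [] => []
  | [x] => [x]
  | x :: y :: rest => if x = y then dedupConsec (y :: rest) else x :: dedupConsec (y :: rest)

-- A's loop after having emitted `a` equals dedupConsec with `a` re-prepended.
lemma dsacLoop_some (floor : Int) (l : List Int) :
    ∀ a : Int, a :: dsacLoop floor l (some a)
      = dedupConsec (a :: l.takeWhile (fun x => !decide (x < floor))) := by
  induction l with
  | nil => intro a; simp [dsacLoop, dedupConsec]
  | cons x xs ih =>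
    intro a
    by_cases hx : x < floor
    · simp [dsacLoop, hx, dedupConsec]
    · by_cases hax : a = x
      · subst hax
        simp only [dsacLoop, List.takeWhile_cons, hx, decide_false, Bool.not_false, if_pos]
        simpa [dedupConsec] using ih a
      · have hne : (some a : Option Int) ≠ some x := by simpa using hax
        simp only [dsacLoop, if_neg hne, List.takeWhile_cons, hx, decide_false,
          Bool.not_false, if_pos]
        have := ih x
        simp only [dedupConsec, if_neg hax]
        cases h : xs.takeWhile (fun x => !decide (x < floor)) with
        | nil =>
          simp [h] at this
          simp [dedupConsec, this]
        | cons y ys =>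
          rw [h] at this
          rw [this]
          simp [dedupConsec]

-- B's cut index takes exactly the prefix not below floor.
lemma take_findCut (floor : Int) (l : List Int) :
    l.take (dsacFindCut floor l) = l.takeWhile (fun x => !decide (x < floor)) := by
  induction l with
  | nil => simp [dsacFindCut]
  | cons x xs ih =>
    by_cases hx : x < floor
    · simp [dsacFindCut, hx]
    · simp [dsacFindCut, hx, List.take_succ_cons, ih]

lemma head?_dedupConsec (l : List Int) : (dedupConsec l).head? = l.head? := by
  induction l with
  | nil => rfl
  | cons x xs ih =>
    cases xs with
    | nil => rfl
    | cons y ys =>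
      by_cases h : x = y
      · subst h; simpa [dedupConsec] using ih
      · simp [dedupConsec, h]

-- B's back-to-front fold computes dedupConsec.
lemma foldl_reverse_dedup (l : List Int) :
    (l.reverse.foldl dsacStep []).reverse = dedupConsec l := by
  induction l with
  | nil => rfl
  | cons x xs ih =>
    have hF : xs.reverse.foldl dsacStep [] = (dedupConsec xs).reverse := by
      rw [← ih, List.reverse_reverse]
    rw [List.reverse_cons, List.foldl_append, hF]
    cases hxs : xs with
    | nil => simp [dsacStep, dedupConsec]
    | cons y ys =>
      have hlast : ((dedupConsec xs).reverse).getLast? = some y := by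
        rw [List.getLast?_reverse, head?_dedupConsec, hxs]; rfl
      by_cases hxy : x = y
      · subst hxy
        simp only [List.foldl_cons, List.foldl_nil, dsacStep, hxs] at *
        rw [hlast]
        simp [dedupConsec, List.reverse_reverse]
      · simp only [List.foldl_cons, List.foldl_nil, dsacStep, hxs] at *
        rw [hlast]
        have : (some y : Option Int) ≠ some x := by simpa using fun h => hxy h.symm
        simp [this, dedupConsec, hxy]

-- ===== VERDICT =====
theorem dedupe_sorted_ask_candidates_spec : Claim_equal_dedupe_sorted_ask_candidates := by
  intro l floor _
  unfold Spec_dedupe_sorted_ask_candidates dedupe_sorted_ask_candidates dedupe_sorted_ask_candidates_alt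
  rw [take_findCut, foldl_reverse_dedup]
  cases l with
  | nil => simp [dsacLoop, dedupConsec]
  | cons x xs =>
    by_cases hx : x < floor
    · simp [dsacLoop, hx, dedupConsec]
    · simp only [dsacLoop, reduceCtorEq, if_false, List.takeWhile_cons, hx,
        decide_false, Bool.not_false, if_pos]
      exact dsacLoop_some floor xs x
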